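-- pv_equiv track=rewrite | github.com/madisonhoover4/cs1301 | HW4.py | bestAthlete
-- ===== SOURCE A (Python) =====
-- def bestAthlete(nestlist):
--     if nestlist == []:
--         return None
--     score = nestlist[0][1]
--     sport = nestlist[0][0]
--     name = nestlist[0][2]
--     for stats in nestlist:
--         if stats[0] != sport:
--             return None
--         if stats[1] > score:
--             score = stats[1]
--             name = stats[2]
--     bestone = str(name) + ", " + str(sport) + ", " + str(score)
--
--     return bestone
-- ===== SOURCE B (Python) =====
-- def bestAthlete(nestlist):
--     if nestlist == []:
--         return None
--     if len({stats[0] for stats in nestlist}) > 1: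
--         return None
--     best = sorted(nestlist, key=lambda s: -s[1])[0]
--     return str(best[2]) + ", " + str(best[0]) + ", " + str(best[1])
-- ===== Notes on version B (the rewrite author's own statement) =====
-- stated objective: alternative
-- what changed: A's single fused scan (early-return validation interleaved with manual running-max tracking) is replaced by a set-comprehension cardinality check for the uniform sport followed by a stable sort on negated score, whose first element is exactly A's first maximal entry.
import Mathlib
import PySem

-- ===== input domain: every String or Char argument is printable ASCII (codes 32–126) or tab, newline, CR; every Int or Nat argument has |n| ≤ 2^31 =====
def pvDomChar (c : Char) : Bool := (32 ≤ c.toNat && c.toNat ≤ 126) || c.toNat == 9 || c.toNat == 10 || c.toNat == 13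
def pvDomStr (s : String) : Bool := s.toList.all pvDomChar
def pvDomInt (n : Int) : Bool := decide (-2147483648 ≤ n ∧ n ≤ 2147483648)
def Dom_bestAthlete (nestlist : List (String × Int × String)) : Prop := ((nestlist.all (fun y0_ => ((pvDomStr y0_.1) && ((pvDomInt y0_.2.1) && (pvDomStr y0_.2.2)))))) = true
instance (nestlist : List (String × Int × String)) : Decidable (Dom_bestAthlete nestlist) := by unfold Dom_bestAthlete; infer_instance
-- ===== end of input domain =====

-- B replaces A's fused early-return scan with a set-cardinality validation of the sport
-- followed by a stable sort on negated score; its first element is A's first maximal entry.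

-- ===== PORT A =====
-- A's for-loop: early return None on a sport mismatch, else track the running strict max.
def bestALoop : List (String × Int × String) → String → Int → String → Option (Int × String)
  | [], _, score, name => some (score, name)
  | s :: t, sport, score, name =>
    if s.1 ≠ sport then none
    else if s.2.1 > score then bestALoop t sport s.2.1 s.2.2
    else bestALoop t sport score name

def bestAthlete (nestlist : List (String × Int × String)) : Option String :=
  match nestlist with
  | [] => none
  | (sp0, sc0, nm0) :: _ =>
    match bestALoop nestlist sp0 sc0 nm0 with
    | none => none
    | some (score, name) => some (name ++ ", " ++ sp0 ++ ", " ++ PySem.Int.toStr score)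

-- ===== PORT B =====
def bestAthlete_alt (nestlist : List (String × Int × String)) : Option String :=
  match nestlist with
  | [] => none
  | _ =>
    if (PySem.Set.ofList (nestlist.map (fun s => s.1))).length > 1 then none
    else
      match PySem.List.pyGet? (PySem.List.sorted nestlist (fun s => -s.2.1)) 0 with
      | none => none  -- unreachable: nestlist is nonempty
      | some b => some (b.2.2 ++ ", " ++ b.1 ++ ", " ++ PySem.Int.toStr b.2.1)

-- ===== PRECONDITION & SPEC =====
def Spec_bestAthlete (nestlist : List (String × Int × String)) (out : Option String) : Prop := out = bestAthlete_alt nestlist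
instance (nestlist : List (String × Int × String)) (out : Option String) : Decidable (Spec_bestAthlete nestlist out) := by unfold Spec_bestAthlete; infer_instance

-- ===== CLAIM (what is proved, stated in full; the proofs are below) =====
def Claim_equal_bestAthlete : Prop := ∀ (nestlist : List (String × Int × String)), Dom_bestAthlete nestlist → Spec_bestAthlete nestlist (bestAthlete nestlist)

-- ===== LEMMAS AND PROOFS =====

-- the running strict-max fold hiding inside A's loop (keeps the FIRST maximal entry)
def maxFold (t : List (String × Int × String)) (m : String × Int × String) : String × Int × String :=
  t.foldl (fun m s => if s.2.1 > m.2.1 then s else m) m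

-- A's loop = validation + pure fold
theorem bestALoop_eq (t : List (String × Int × String)) :
    ∀ sport score name, bestALoop t sport score name =
      if t.any (fun s => s.1 ≠ sport) then none
      else some ((maxFold t (sport, score, name)).2.1, (maxFold t (sport, score, name)).2.2) := by
  induction t with
  | nil => intro sport score name; simp [bestALoop, maxFold]
  | cons s t ih =>
    intro sport score name
    obtain ⟨a, b, c⟩ := s
    simp only [bestALoop, List.any_cons, maxFold, List.foldl_cons]
    by_cases h1 : a = sport
    · subst h1
      simp only [ne_eq, not_true_eq_false, if_false, decide_false, Bool.false_or]
      by_cases h2 : b > score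
      · simp [h2, ih, maxFold]
      · simp [h2, ih, maxFold]
    · simp [h1]

-- the fold step keeps the initial sport when every element carries it
theorem maxFold_sport (t : List (String × Int × String)) :
    ∀ m sp0, m.1 = sp0 → (∀ s ∈ t, s.1 = sp0) → (maxFold t m).1 = sp0 := by
  induction t with
  | nil => intro m sp0 hm _; simpa [maxFold] using hm
  | cons s t ih =>
    intro m sp0 hm hall
    simp only [maxFold, List.foldl_cons]
    by_cases h : s.2.1 > m.2.1
    · simp only [h, if_true]
      exact ih s sp0 (hall s (by simp)) (fun x hx => hall x (by simp [hx]))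
    · simp only [h, if_false]
      exact ih m sp0 hm (fun x hx => hall x (by simp [hx]))

-- the two unfolding equations of PySem's stable insertion
theorem insertBy_nil {α : Type} (b : α → α → Bool) (x : α) :
    PySem.List.insertBy b x [] = [x] := by
  simp [PySem.List.insertBy]

theorem insertBy_cons {α : Type} (b : α → α → Bool) (x y : α) (t : List α) :
    PySem.List.insertBy b x (y :: t) = if b x y then x :: y :: t else y :: PySem.List.insertBy b x t := by
  simp [PySem.List.insertBy]

-- head of an insertion-sort fold = running "first wins on ties" fold of the heads
theorem foldl_insertBy_head {α : Type} (before : α → α → Bool) (t : List α) :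
    ∀ (m : α) (rest : List α),
      (t.foldl (fun acc x => PySem.List.insertBy before x acc) (m :: rest)).head? =
        some (t.foldl (fun m x => if before x m then x else m) m) := by
  induction t with
  | nil => intro m rest; rfl
  | cons x t ih =>
    intro m rest
    simp only [List.foldl_cons, insertBy_cons]
    by_cases h : before x m = true
    · simp only [h, if_true]
      exact ih x (m :: rest)
    · simp only [h, if_false, Bool.false_eq_true]
      exact ih m _

theorem head_sorted_eq (t : List (String × Int × String)) (m : String × Int × String) :
    (PySem.List.sorted (m :: t) (fun s => (-s.2.1 : Int))).head? = some (maxFold t m) := by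
  rw [PySem.List.sorted_eq_foldl_insertBy]
  simp only [List.foldl_cons, insertBy_nil]
  rw [foldl_insertBy_head]
  congr 1
  have hfun : (fun (m x : String × Int × String) =>
      if (fun a b => decide ((-a.2.1 : Int) < -b.2.1)) x m = true then x else m) =
      fun m x => if x.2.1 > m.2.1 then x else m := by
    funext m x
    by_cases h : x.2.1 > m.2.1
    · have hlt : (-x.2.1 : Int) < -m.2.1 := by omega
      simp [h, hlt]
    · have hlt : ¬ ((-x.2.1 : Int) < -m.2.1) := by omega
      simp [h, hlt]
  show (t.foldl (fun m x =>
      if (fun a b => decide ((-a.2.1 : Int) < -b.2.1)) x m = true then x else m) m) = maxFold t m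
  rw [hfun]; rfl

-- Python's [0] on a list is head?
theorem pyGet?_zero (l : List (String × Int × String)) : PySem.List.pyGet? l 0 = l.head? := by
  cases l <;> simp [PySem.List.pyGet?, PySem.List.pyIdx?]

-- folding Set.add over copies of v leaves {v}
theorem foldl_add_const (v : String) (xs : List String) (h : ∀ x ∈ xs, x = v) :
    xs.foldl PySem.Set.add [v] = [v] := by
  induction xs with
  | nil => rfl
  | cons x t ih =>
    have hx := h x (by simp)
    simp only [List.foldl_cons, hx, PySem.Set.add_of_mem (by simp : v ∈ [v])]
    exact ih (fun y hy => h y (by simp [hy]))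

-- the sport set has ≤ 1 element iff no element disagrees with the first sport
theorem set_card_le_one (t : List (String × Int × String)) (v : String) :
    (¬ (PySem.Set.ofList (v :: t.map (fun s => s.1))).length > 1) ↔
      (t.any (fun s => s.1 ≠ v)) = false := by
  constructor
  · intro hle
    by_contra hany
    rw [Bool.not_eq_false, List.any_eq_true] at hany
    obtain ⟨x, hx, hne⟩ := hany
    have hne' : x.1 ≠ v := by simpa using hne
    have hmem1 : v ∈ PySem.Set.ofList (v :: t.map (fun s => s.1)) := by
      rw [PySem.Set.mem_ofList]; simp
    have hmem2 : x.1 ∈ PySem.Set.ofList (v :: t.map (fun s => s.1)) := by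
      rw [PySem.Set.mem_ofList]
      exact List.mem_cons_of_mem _ (List.mem_map.mpr ⟨x, hx, rfl⟩)
    match hs : PySem.Set.ofList (v :: t.map (fun s => s.1)) with
    | [] => rw [hs] at hmem1; simp at hmem1
    | [z] =>
      rw [hs] at hmem1 hmem2
      simp only [List.mem_singleton] at hmem1 hmem2
      exact hne' (hmem2.trans hmem1.symm)
    | z1 :: z2 :: zs =>
      rw [hs] at hle
      exact hle (by simp)
  · intro hall
    have hall' : ∀ s ∈ t, s.1 = v := by
      intro s hs
      by_contra hne
      rw [Bool.eq_false_iff] at hall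
      exact hall (List.any_eq_true.mpr ⟨s, hs, by simpa using hne⟩)
    have hone : PySem.Set.ofList (v :: t.map (fun s => s.1)) = [v] := by
      rw [PySem.Set.ofList_eq_foldl]
      simp only [List.foldl_cons]
      have h0 : PySem.Set.add [] v = [v] := rfl
      rw [h0]
      exact foldl_add_const v _ (by
        intro x hx; obtain ⟨s, hs, rfl⟩ := List.mem_map.mp hx; exact hall' s hs)
    rw [hone]
    simp

-- ===== VERDICT (by name: the statement is the Claim_ definition above) =====
theorem bestAthlete_spec : Claim_equal_bestAthlete := by
  intro nestlist _
  unfold Spec_bestAthlete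
  match nestlist with
  | [] => rfl
  | (sp0, sc0, nm0) :: t =>
    simp only [bestAthlete, bestAthlete_alt, List.map_cons]
    have hhead : bestALoop ((sp0, sc0, nm0) :: t) sp0 sc0 nm0 = bestALoop t sp0 sc0 nm0 := by
      simp [bestALoop]
    rw [hhead, bestALoop_eq, pyGet?_zero, head_sorted_eq]
    cases hmis : (t.any (fun s => s.1 ≠ sp0)) with
    | true =>
      have hset : (PySem.Set.ofList (sp0 :: t.map (fun s => s.1))).length > 1 := by
        by_contra h
        rw [set_card_le_one t sp0] at h
        rw [h] at hmis; exact Bool.false_ne_true hmis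
      simp [hset]
    | false =>
      have hset : ¬ (PySem.Set.ofList (sp0 :: t.map (fun s => s.1))).length > 1 :=
        (set_card_le_one t sp0).mpr hmis
      have hall : ∀ s ∈ t, s.1 = sp0 := by
        intro s hs; by_contra hne
        have hx : (t.any fun s => decide (s.1 ≠ sp0)) = true :=
          List.any_eq_true.mpr ⟨s, hs, by simpa using hne⟩
        rw [hmis] at hx; exact Bool.false_ne_true hx
      have hsp : (maxFold t (sp0, sc0, nm0)).1 = sp0 :=
        maxFold_sport t (sp0, sc0, nm0) sp0 rfl hall
      simp [hset, hsp]
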